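-- pv_equiv track=rewrite | github.com/MGezault/Cours | DevPython/TP8a/TP8a problème de mots de passe-20241105/motdepasse.py | minimum_unique_ok
-- ===== SOURCE A (Python) =====
-- def minimum_unique_ok(mdp):
--     """Permet de savoir si le plus petit chiffre est unique
--
--     Args:
--         mdp (str): Le mot de passe que l'on veut tester
--
--     Returns:
--         bool: True si le plus petit chiffre est unique, False sinon
--     """
--     mini = None
--     occurence = 0
--     #Pour chaque tour de boucle, mini contient le plus petit chiffre rencontré parmi les caractères rencontrés et occurence le nombre de fois que mini a été observé
--     for cara in mdp:
--         if (cara.isdigit()) and ((mini is None) or  (mini<cara)):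
--             mini = cara
--             occurence = 1
--         elif mini == cara:
--             occurence +=1
--     return not(occurence>=2)
-- ===== SOURCE B (Python) =====
-- def minimum_unique_ok(mdp):
--     """Same predicate as A, via two separate passes instead of the fused
--     running-extremum-with-reset loop: collect the digit characters, then
--     check whether the extremal digit occurs fewer than twice."""
--     digits = [c for c in mdp if c.isdigit()]
--     return not digits or digits.count(max(digits)) < 2
-- ===== Notes on version B (the rewrite author's own statement) =====
-- stated objective: simpler
-- what changed: Replaces the single fused loop maintaining a running extremum with reset-and-increment bookkeeping by a filter pass, a max, and a count pass.
import Mathlib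
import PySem

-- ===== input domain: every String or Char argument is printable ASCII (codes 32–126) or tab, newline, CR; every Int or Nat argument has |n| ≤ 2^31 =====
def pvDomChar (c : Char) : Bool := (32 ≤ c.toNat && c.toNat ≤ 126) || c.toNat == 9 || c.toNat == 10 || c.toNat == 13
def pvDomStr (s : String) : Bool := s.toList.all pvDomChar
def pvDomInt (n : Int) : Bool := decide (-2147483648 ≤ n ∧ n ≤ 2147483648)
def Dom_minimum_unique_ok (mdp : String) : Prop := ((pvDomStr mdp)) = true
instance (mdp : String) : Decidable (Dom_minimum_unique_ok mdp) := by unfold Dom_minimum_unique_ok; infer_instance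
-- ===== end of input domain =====

-- B replaces A's fused running-extremum loop (reset/increment bookkeeping) by
-- filter-then-max-then-count; same return value everywhere (simpler, not faster).

-- ===== PORT A =====
-- A's loop body: mini/occurence updated per character, branches in source order.
def pvStepA (st : Option Char × Int) (cara : Char) : Option Char × Int :=
  match st with
  | (none, occurence) =>
      -- 'mini is None': first branch fires iff cara is a digit; 'None == cara' is False
      if PySem.Chars.isdigit cara then (some cara, 1) else (none, occurence)
  | (some mini, occurence) =>
      if PySem.Chars.isdigit cara && decide (mini < cara) then (some cara, 1)
      else if mini == cara then (some mini, occurence + 1)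
      else (some mini, occurence)

def minimum_unique_ok (mdp : String) : Bool :=
  let st := mdp.toList.foldl pvStepA (none, 0)
  !(decide (st.2 ≥ 2))

-- ===== PORT B =====
def minimum_unique_ok_alt (mdp : String) : Bool :=
  let digits := mdp.toList.filter PySem.Chars.isdigit
  match PySem.List.max? digits (fun c => c) with
  | none => true                                   -- 'not digits'
  | some m => decide (digits.count m < 2)

-- ===== PRECONDITION & SPEC =====
def Spec_minimum_unique_ok (mdp : String) (out : Bool) : Prop := out = minimum_unique_ok_alt mdp
instance (mdp : String) (out : Bool) : Decidable (Spec_minimum_unique_ok mdp out) := by unfold Spec_minimum_unique_ok; infer_instance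

-- ===== CLAIM (what is proved, stated in full; the proofs are below) =====
def Claim_equal_minimum_unique_ok : Prop := ∀ (mdp : String), Dom_minimum_unique_ok mdp → Spec_minimum_unique_ok mdp (minimum_unique_ok mdp)

-- ===== LEMMAS AND PROOFS =====

-- Loop invariant of A's fold: after processing digits ds, the state is (none,0)
-- if ds = [], else (some m, count of m in ds) where m is the maximum of ds.
def pvInvA (st : Option Char × Int) (ds : List Char) : Prop :=
  match st with
  | (none, occ) => ds = [] ∧ occ = 0
  | (some m, occ) =>
      PySem.Chars.isdigit m = true ∧ m ∈ ds ∧ (∀ x ∈ ds, x ≤ m) ∧ occ = (ds.count m : Int)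

theorem pvInvA_step (l : List Char) :
    ∀ (st : Option Char × Int) (ds : List Char), pvInvA st ds →
      pvInvA (l.foldl pvStepA st) (ds ++ l.filter PySem.Chars.isdigit) := by
  induction l with
  | nil => intro st ds h; simpa using h
  | cons c l ih =>
    intro st ds h
    by_cases hd : PySem.Chars.isdigit c = true
    · have hstep : pvInvA (pvStepA st c) (ds ++ [c]) := by
        match st with
        | (none, occ) =>
          obtain ⟨hds, hocc⟩ := h
          simp [pvStepA, hd, pvInvA, hds]
        | (some m, occ) =>
          obtain ⟨hm, hmem, hub, hcnt⟩ := h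
          by_cases hlt : m < c
          · have hzero : ds.count c = 0 :=
              List.count_eq_zero.mpr (fun hc => absurd (hub c hc) (not_le.mpr hlt))
            have e : pvStepA (some m, occ) c = (some c, 1) := by simp [pvStepA, hd, hlt]
            rw [e]
            refine ⟨hd, List.mem_append.mpr (Or.inr (by simp)), ?_, ?_⟩
            · intro x hx
              rcases List.mem_append.mp hx with hx | hx
              · exact le_of_lt (lt_of_le_of_lt (hub x hx) hlt)
              · simp at hx; simp [hx]
            · rw [List.count_append, hzero]; simp
          · by_cases heq : m = c
            · have e : pvStepA (some m, occ) c = (some m, occ + 1) := by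
                simp [pvStepA, heq]
              rw [e]
              refine ⟨hm, List.mem_append.mpr (Or.inl hmem), ?_, ?_⟩
              · intro x hx
                rcases List.mem_append.mp hx with hx | hx
                · exact hub x hx
                · simp at hx; subst hx; exact le_of_eq heq.symm
              · have h1 : List.count m [c] = 1 := by simp [heq]
                rw [List.count_append, h1, hcnt]; push_cast; ring
            · have e : pvStepA (some m, occ) c = (some m, occ) := by
                simp [pvStepA, hd, hlt, heq]
              rw [e]
              refine ⟨hm, List.mem_append.mpr (Or.inl hmem), ?_, ?_⟩
              · intro x hx
                rcases List.mem_append.mp hx with hx | hx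
                · exact hub x hx
                · simp at hx; subst hx; exact le_of_not_gt hlt
              · have h0 : List.count m [c] = 0 := by simp [Ne.symm heq]
                rw [List.count_append, h0, hcnt]; simp
      have := ih _ _ hstep
      simpa [List.filter_cons, hd, List.foldl_cons] using this
    · have hstep : pvStepA st c = st := by
        match st with
        | (none, occ) => simp [pvStepA, hd]
        | (some m, occ) =>
          obtain ⟨hm, _, _, _⟩ := h
          have hne : (m == c) = false := by
            simp only [beq_eq_false_iff_ne]
            intro he; rw [he] at hm; exact hd hm
          simp [pvStepA, hd, hne]
      have := ih st ds h
      simpa [List.filter_cons, hd, List.foldl_cons, hstep] using this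

-- ===== VERDICT (by name: the statement is the Claim_ definition above) =====
theorem minimum_unique_ok_spec : Claim_equal_minimum_unique_ok := by
  intro mdp _
  unfold Spec_minimum_unique_ok minimum_unique_ok minimum_unique_ok_alt
  show (!(decide ((List.foldl pvStepA (none, 0) mdp.toList).2 ≥ 2))) =
    (match PySem.List.max? (mdp.toList.filter PySem.Chars.isdigit) (fun c => c) with
     | none => true
     | some m => decide ((mdp.toList.filter PySem.Chars.isdigit).count m < 2))
  have h := pvInvA_step (mdp.toList) (none, 0) [] (by simp [pvInvA])
  simp only [List.nil_append] at h
  rcases hst : mdp.toList.foldl pvStepA (none, 0) with ⟨mini, occ⟩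
  rw [hst] at h
  match mini, h with
  | none, ⟨hnil, hocc⟩ =>
    rw [hnil, hocc]
    simp [PySem.List.max?]
  | some m, ⟨_, hmem, hub, hcnt⟩ =>
    have hne : mdp.toList.filter PySem.Chars.isdigit ≠ [] := by
      intro he; rw [he] at hmem; exact absurd hmem List.not_mem_nil
    rcases hmax : PySem.List.max? (mdp.toList.filter PySem.Chars.isdigit) (fun c => c) with _ | m'
    · exact absurd ((PySem.List.max?_eq_none_iff _ _).mp hmax) hne
    · have hm'mem := PySem.List.max?_mem hmax
      have h1 : m ≤ m' := PySem.List.max?_isMax hmax m hmem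
      have h2 : m' ≤ m := hub m' hm'mem
      have hmm : m' = m := le_antisymm h2 h1
      subst hmm
      simp only [hcnt, ge_iff_le]
      by_cases hc : (mdp.toList.filter PySem.Chars.isdigit).count m' < 2
      · have hle : ¬ ((2:Int) ≤ ((mdp.toList.filter PySem.Chars.isdigit).count m' : Int)) := by
          omega
        simp [hc, hle]
      · have hle : ((2:Int) ≤ ((mdp.toList.filter PySem.Chars.isdigit).count m' : Int)) := by
          omega
        simp [hc, hle]
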